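-- pv_equiv track=rewrite | github.com/juwkim/boj | 백준/Bronze/8417. Jasio/Jasio.py | solve
-- ===== SOURCE A (Python) =====
-- def solve(word):
--     for i in range(len(word)-1):
--         if word[i] == word[i+1]:
--             return 1
--     for i in range(len(word)-2):
--         if word[i] == word[i+2]:
--             return 1
--     return 0
-- ===== SOURCE B (Python) =====
-- def solve(word):
--     prev2 = prev = None
--     for c in word:
--         if c == prev or c == prev2:
--             return 1
--         prev2, prev = prev, c
--     return 0
-- ===== Notes on version B (the rewrite author's own statement) =====
-- stated objective: alternative
-- what changed: Replaces A's two index-based passes (adjacent pairs, then distance-2 pairs) by a single index-free pass over the characters that carries the last two seen characters in rolling registers and compares each new character against them.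
import Mathlib
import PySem

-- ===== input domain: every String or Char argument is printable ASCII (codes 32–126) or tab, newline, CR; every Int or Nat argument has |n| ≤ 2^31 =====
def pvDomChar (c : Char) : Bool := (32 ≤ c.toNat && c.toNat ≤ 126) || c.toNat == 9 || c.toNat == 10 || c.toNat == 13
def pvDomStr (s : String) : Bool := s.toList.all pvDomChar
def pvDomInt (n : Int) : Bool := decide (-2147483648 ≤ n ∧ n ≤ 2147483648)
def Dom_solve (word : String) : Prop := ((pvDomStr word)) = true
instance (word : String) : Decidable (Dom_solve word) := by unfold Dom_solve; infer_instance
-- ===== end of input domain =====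

-- B replaces A's two index-based passes by one index-free pass carrying the last two characters in registers (alternative decomposition, not faster).


-- ===== PORT A =====
-- 'for i in range(..): if word[i] == word[i+d]: return 1' as a recursive scan over the index list
def solveLoopA (cs : List Char) (d : Int) : List Int → Bool
  | [] => false
  | i :: rest =>
    if PySem.List.pyGet? cs i = PySem.List.pyGet? cs (i + d) then true
    else solveLoopA cs d rest

def solve (word : String) : Int :=
  let cs := word.toList
  let n : Int := cs.length
  if solveLoopA cs 1 (PySem.List.pyRange 0 (n - 1) 1) then 1
  else if solveLoopA cs 2 (PySem.List.pyRange 0 (n - 2) 1) then 1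
  else 0

-- ===== PORT B =====
-- 'for c in word: if c == prev or c == prev2: return 1; prev2, prev = prev, c'
def scanB : Option Char → Option Char → List Char → Bool
  | _, _, [] => false
  | p2, p1, c :: rest =>
    if some c = p1 ∨ some c = p2 then true
    else scanB p1 (some c) rest

def solve_alt (word : String) : Int :=
  if scanB none none word.toList then 1 else 0

-- ===== PRECONDITION & SPEC =====
def Spec_solve (word : String) (out : Int) : Prop := out = solve_alt word
instance (word : String) (out : Int) : Decidable (Spec_solve word out) := by unfold Spec_solve; infer_instance

-- ===== CLAIM (what is proved, stated in full; the proofs are below) =====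
def Claim_equal_solve : Prop := ∀ (word : String), Dom_solve word → Spec_solve word (solve word)

-- ===== LEMMAS AND PROOFS =====

-- the common characterisation: some position equals the next or next-but-one position
def Near (cs : List Char) : Prop :=
  ∃ i : ℕ, (cs[i]? ≠ none ∧ cs[i]? = cs[i+1]?) ∨ (cs[i]? ≠ none ∧ cs[i]? = cs[i+2]?)

theorem Near_cons (c : Char) (rest : List Char) :
    Near (c :: rest) ↔ rest[0]? = some c ∨ rest[1]? = some c ∨ Near rest := by
  constructor
  · rintro ⟨i, h⟩
    cases i with
    | zero => simp only [List.getElem?_cons_zero, List.getElem?_cons_succ] at h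
              rcases h with ⟨-, h⟩ | ⟨-, h⟩
              · exact Or.inl h.symm
              · exact Or.inr (Or.inl h.symm)
    | succ j => simp only [List.getElem?_cons_succ] at h
                exact Or.inr (Or.inr ⟨j, h⟩)
  · rintro (h | h | ⟨j, h⟩)
    · exact ⟨0, Or.inl ⟨by simp, by simp [h.symm]⟩⟩
    · exact ⟨0, Or.inr ⟨by simp, by simp [h.symm]⟩⟩
    · exact ⟨j + 1, by simpa only [List.getElem?_cons_succ] using h⟩

theorem scanB_iff (cs : List Char) (p2 p1 : Option Char) :
    scanB p2 p1 cs = true ↔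
      (cs[0]? ≠ none ∧ cs[0]? = p1) ∨ (cs[0]? ≠ none ∧ cs[0]? = p2) ∨
      (cs[1]? ≠ none ∧ cs[1]? = p1) ∨ Near cs := by
  induction cs generalizing p2 p1 with
  | nil =>
    constructor
    · intro h; exact absurd h (by simp [scanB])
    · rintro (⟨hn, hd⟩ | ⟨hn, hd⟩ | ⟨hn, hd⟩ | ⟨i, ⟨hn, _⟩ | ⟨hn, _⟩⟩) <;>
        exact absurd rfl hn
  | cons c rest ih =>
    simp only [scanB]
    split_ifs with h
    · constructor
      · intro _
        rcases h with h' | h'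
        · exact Or.inl ⟨by simp, by simpa using h'⟩
        · exact Or.inr (Or.inl ⟨by simp, by simpa using h'⟩)
      · intro _; rfl
    · have h1 : ¬ some c = p1 := fun hc => h (Or.inl hc)
      have h2 : ¬ some c = p2 := fun hc => h (Or.inr hc)
      rw [ih, Near_cons]
      simp only [List.getElem?_cons_zero, List.getElem?_cons_succ]
      constructor
      · rintro (⟨-, hd⟩ | ⟨hn, hd⟩ | ⟨-, hd⟩ | hnear)
        · exact Or.inr (Or.inr (Or.inr (Or.inl hd)))
        · exact Or.inr (Or.inr (Or.inl ⟨hn, hd⟩))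
        · exact Or.inr (Or.inr (Or.inr (Or.inr (Or.inl hd))))
        · exact Or.inr (Or.inr (Or.inr (Or.inr (Or.inr hnear))))
      · rintro (⟨-, hd⟩ | ⟨-, hd⟩ | ⟨hn, hd⟩ | hd | hd | hnear)
        · exact absurd hd h1
        · exact absurd hd h2
        · exact Or.inr (Or.inl ⟨hn, hd⟩)
        · exact Or.inl ⟨by simp [hd], hd⟩
        · exact Or.inr (Or.inr (Or.inl ⟨by simp [hd], hd⟩))
        · exact Or.inr (Or.inr (Or.inr hnear))

theorem solveLoopA_eq_true {cs : List Char} {d : Int} {l : List Int} :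
    solveLoopA cs d l = true ↔
      ∃ i ∈ l, PySem.List.pyGet? cs i = PySem.List.pyGet? cs (i + d) := by
  induction l with
  | nil => simp [solveLoopA]
  | cons i rest ih =>
    simp only [solveLoopA]
    split_ifs with h
    · simp [h]
    · simp [ih, h]

theorem A_cond_iff_Near (cs : List Char) :
    (solveLoopA cs 1 (PySem.List.pyRange 0 ((cs.length : Int) - 1) 1) = true ∨
     solveLoopA cs 2 (PySem.List.pyRange 0 ((cs.length : Int) - 2) 1) = true) ↔ Near cs := by
  simp only [solveLoopA_eq_true, PySem.List.mem_pyRange_one]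
  constructor
  · rintro (⟨i, ⟨h0, h1⟩, hc⟩ | ⟨i, ⟨h0, h1⟩, hc⟩)
    · rw [show i = ((i.toNat : ℕ) : ℤ) by omega,
        show ((i.toNat : ℤ) + 1) = ((i.toNat + 1 : ℕ) : ℤ) by push_cast; ring] at hc
      rw [PySem.List.pyGet?_natCast, PySem.List.pyGet?_natCast] at hc
      refine ⟨i.toNat, Or.inl ⟨?_, hc⟩⟩
      rw [Ne, List.getElem?_eq_none_iff]
      omega
    · rw [show i = ((i.toNat : ℕ) : ℤ) by omega,
        show ((i.toNat : ℤ) + 2) = ((i.toNat + 2 : ℕ) : ℤ) by push_cast; ring] at hc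
      rw [PySem.List.pyGet?_natCast, PySem.List.pyGet?_natCast] at hc
      refine ⟨i.toNat, Or.inr ⟨?_, hc⟩⟩
      rw [Ne, List.getElem?_eq_none_iff]
      omega
  · rintro ⟨i, ⟨hn, he⟩ | ⟨hn, he⟩⟩
    · have hi : i < cs.length := by
        rw [Ne, List.getElem?_eq_none_iff] at hn; omega
      have hi1 : i + 1 < cs.length := by
        by_contra hcon
        have hz : cs[i+1]? = none := List.getElem?_eq_none (by omega)
        rw [hz] at he
        exact hn he
      refine Or.inl ⟨(i : Int), ⟨by omega, by omega⟩, ?_⟩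
      rw [PySem.List.pyGet?_natCast,
        show ((i : ℤ) + 1) = ((i + 1 : ℕ) : ℤ) by push_cast; ring,
        PySem.List.pyGet?_natCast]
      exact he
    · have hi : i < cs.length := by
        rw [Ne, List.getElem?_eq_none_iff] at hn; omega
      have hi2 : i + 2 < cs.length := by
        by_contra hcon
        have hz : cs[i+2]? = none := List.getElem?_eq_none (by omega)
        rw [hz] at he
        exact hn he
      refine Or.inr ⟨(i : Int), ⟨by omega, by omega⟩, ?_⟩
      rw [PySem.List.pyGet?_natCast,
        show ((i : ℤ) + 2) = ((i + 2 : ℕ) : ℤ) by push_cast; ring,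
        PySem.List.pyGet?_natCast]
      exact he

-- ===== VERDICT (by name: the statement is the Claim_ definition above) =====
theorem solve_spec : Claim_equal_solve := by
  intro word _
  unfold Spec_solve solve solve_alt
  dsimp only
  have hBN : scanB none none word.toList = true ↔ Near word.toList := by
    rw [scanB_iff]
    constructor
    · rintro (⟨hn, hd⟩ | ⟨hn, hd⟩ | ⟨hn, hd⟩ | h)
      · exact absurd hd hn
      · exact absurd hd hn
      · exact absurd hd hn
      · exact h
    · exact fun h => Or.inr (Or.inr (Or.inr h))
  have hA := A_cond_iff_Near word.toList
  split_ifs with g1 g2 g3 <;> first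
    | rfl
    | (exfalso; tauto)
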